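-- pv_equiv track=rewrite | github.com/12mihai05/Bioinformatics | Lab7/ex1.py | find_repetitions
-- ===== SOURCE A (Python) =====
-- def find_repetitions(sequence, min_length=3, max_length=6, min_repeats=2):
--     results = {}
--
--     for pattern_length in range(min_length, max_length + 1):
--         pattern_counts = {}
--
--         for i in range(len(sequence) - pattern_length + 1):
--             pattern = sequence[i:i + pattern_length]
--
--             if all(base in 'ACGT' for base in pattern):
--                 pattern_counts[pattern] = pattern_counts.get(pattern, 0) + 1
--
--         repetitive_patterns = {pattern: count for pattern, count in pattern_counts.items()
--                               if count >= min_repeats}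
--
--         if repetitive_patterns:
--             results[pattern_length] = dict(sorted(repetitive_patterns.items(),
--                                                  key=lambda x: (-x[1], x[0])))
--
--     return results
-- ===== SOURCE B (Python) =====
-- def find_repetitions(sequence, min_length=3, max_length=6, min_repeats=2):
--     valid = set('ACGT')
--     n = len(sequence)
--     results = {}
--     for length in range(min_length, max_length + 1):
--         ws = sorted(sequence[i:i + length] for i in range(n - length + 1))
--         m = len(ws)
--         entries = []
--         i = 0
--         while i < m:                      # run-length encode the sorted windows
--             j = i + 1
--             while j < m and ws[j] == ws[i]:
--                 j += 1
--             entries.append((ws[i], j - i))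
--             i = j
--         entries = [(p, c) for p, c in entries
--                    if c >= min_repeats and set(p) <= valid]
--         entries.sort(key=lambda x: (-x[1], x[0]))
--         if entries:
--             results[length] = dict(entries)
--     return results
-- ===== Notes on version B (the rewrite author's own statement) =====
-- stated objective: alternative
-- what changed: Per pattern length, B sorts the list of windows and run-length-encodes adjacent duplicates to obtain per-pattern counts, testing validity once per distinct pattern via set inclusion, instead of A's per-window character test and running hash-dict counting.
import Mathlib
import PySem

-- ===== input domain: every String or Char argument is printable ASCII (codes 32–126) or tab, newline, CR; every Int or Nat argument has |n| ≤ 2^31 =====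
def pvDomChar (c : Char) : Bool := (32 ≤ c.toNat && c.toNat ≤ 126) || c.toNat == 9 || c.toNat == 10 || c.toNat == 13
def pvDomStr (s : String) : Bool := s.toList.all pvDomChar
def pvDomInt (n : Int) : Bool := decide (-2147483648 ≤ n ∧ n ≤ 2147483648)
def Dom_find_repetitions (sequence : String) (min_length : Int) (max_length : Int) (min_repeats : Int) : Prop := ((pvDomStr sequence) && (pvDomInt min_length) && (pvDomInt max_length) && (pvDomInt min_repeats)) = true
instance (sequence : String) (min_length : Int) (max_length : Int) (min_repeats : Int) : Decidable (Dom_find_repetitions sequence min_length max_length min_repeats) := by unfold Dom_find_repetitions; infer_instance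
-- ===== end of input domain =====

-- B re-implements the same function by a different counting mechanism (sort the windows and
-- run-length-encode adjacent duplicates, validity tested once per distinct pattern); same
-- return value on every input, similar cost (no speed claim).

-- ===== PORT A =====
def find_repetitions (sequence : String) (min_length : Int) (max_length : Int) (min_repeats : Int) : List (Int × List (String × Int)) :=
  ((PySem.List.pyRange min_length (max_length + 1) 1).foldl (fun results pattern_length =>
    let pattern_counts : PySem.Dict String Int :=
      (PySem.List.pyRange 0 (PySem.Str.len sequence - pattern_length + 1) 1).foldl (fun d i =>
        let pattern := PySem.Str.slice sequence (some i) (some (i + pattern_length))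
        if pattern.toList.all (fun base => PySem.Chars.isIn [base] "ACGT".toList) then
          d.insert pattern (d.getD pattern 0 + 1)
        else d) PySem.Dict.empty
    let repetitive_patterns := pattern_counts.items.filter (fun x => decide (min_repeats ≤ x.2))
    if repetitive_patterns.isEmpty then results
    else results.insert pattern_length
      (PySem.List.sorted2 repetitive_patterns (fun x => -x.2) (fun x => x.1)))
    (PySem.Dict.empty : PySem.Dict Int (List (String × Int)))).items

-- ===== PORT B =====
-- the inner while loops of Source B: run-length-encode a list, each step consumes one maximal run
def pvRLE : List String → List (String × Int)
  | [] => []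
  | w :: rest =>
    (w, 1 + (rest.takeWhile (fun x => x == w)).length) :: pvRLE (rest.dropWhile (fun x => x == w))
  termination_by l => l.length
  decreasing_by
    simpa using Nat.lt_succ_of_le (List.length_dropWhile_le _ _)

def find_repetitions_alt (sequence : String) (min_length : Int) (max_length : Int) (min_repeats : Int) : List (Int × List (String × Int)) :=
  let valid := PySem.Set.ofList "ACGT".toList
  let n := PySem.Str.len sequence
  ((PySem.List.pyRange min_length (max_length + 1) 1).foldl (fun results length_ =>
    let ws := PySem.List.sorted ((PySem.List.pyRange 0 (n - length_ + 1) 1).map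
                (fun i => PySem.Str.slice sequence (some i) (some (i + length_)))) (fun w => w)
    let entries := (pvRLE ws).filter (fun x =>
      decide (min_repeats ≤ x.2) && PySem.Set.issubset (PySem.Set.ofList x.1.toList) valid)
    let entries2 := PySem.List.sorted2 entries (fun x => -x.2) (fun x => x.1)
    if entries2.isEmpty then results else results.insert length_ entries2)
    (PySem.Dict.empty : PySem.Dict Int (List (String × Int)))).items

-- ===== PRECONDITION & SPEC =====
def Spec_find_repetitions (sequence : String) (min_length : Int) (max_length : Int) (min_repeats : Int) (out : List (Int × List (String × Int))) : Prop := out = find_repetitions_alt sequence min_length max_length min_repeats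
instance (sequence : String) (min_length : Int) (max_length : Int) (min_repeats : Int) (out : List (Int × List (String × Int))) : Decidable (Spec_find_repetitions sequence min_length max_length min_repeats out) := by unfold Spec_find_repetitions; infer_instance

-- ===== CLAIM (what is proved, stated in full; the proofs are below) =====
def Claim_equal_find_repetitions : Prop := ∀ (sequence : String) (min_length : Int) (max_length : Int) (min_repeats : Int), Dom_find_repetitions sequence min_length max_length min_repeats → Spec_find_repetitions sequence min_length max_length min_repeats (find_repetitions sequence min_length max_length min_repeats)

-- ===== LEMMAS AND PROOFS =====

-- 'base in "ACGT"' on a one-character string is membership of the character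
lemma pv_isIn_singleton (c : Char) (s : List Char) :
    PySem.Chars.isIn [c] s = decide (c ∈ s) := by
  rw [Bool.eq_iff_iff, PySem.Chars.isIn_iff_infix, decide_eq_true_iff]
  constructor
  · intro h; exact h.sublist.subset (by simp)
  · intro h; obtain ⟨u, v, rfl⟩ := List.append_of_mem h; exact ⟨u, v, by simp⟩

-- A's per-window validity test agrees with B's set-inclusion test
lemma pv_valid_eq (p : String) :
    (p.toList.all (fun base => PySem.Chars.isIn [base] "ACGT".toList)) =
      PySem.Set.issubset (PySem.Set.ofList p.toList) (PySem.Set.ofList "ACGT".toList) := by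
  rw [Bool.eq_iff_iff, List.all_eq_true, PySem.Set.issubset_iff]
  simp [pv_isIn_singleton, PySem.Set.mem_ofList]

-- sorted2 with the key pair (-count, pattern) is sorting by the lexicographic key
lemma pv_sorted2_eq_sorted_toLex (xs : List (String × Int)) :
    PySem.List.sorted2 xs (fun x => -x.2) (fun x => x.1) =
      PySem.List.sorted xs (fun x => toLex ((-x.2 : Int), x.1)) := by
  show List.foldl _ [] xs = List.foldl _ [] xs
  congr 1
  funext acc x
  congr 1
  funext a b
  show (decide ((-a.2 : Int) < -b.2) || (!decide ((-b.2 : Int) < -a.2) && decide (a.1 < b.1)))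
      = decide (toLex ((-a.2 : Int), a.1) < toLex ((-b.2 : Int), b.1))
  rw [Bool.eq_iff_iff]
  simp only [Bool.or_eq_true, Bool.and_eq_true, Bool.not_eq_true', decide_eq_true_iff,
    decide_eq_false_iff_not, Prod.Lex.lt_iff, ofLex_toLex]
  constructor
  · rintro (h | ⟨h1, h2⟩)
    · exact Or.inl h
    · by_cases hlt : (-a.2 : Int) < -b.2
      · exact Or.inl hlt
      · exact Or.inr ⟨by omega, h2⟩
  · rintro (h | ⟨h1, h2⟩)
    · exact Or.inl h
    · exact Or.inr ⟨by omega, h2⟩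

-- sorting by (-count, pattern) is invariant under permutation when patterns are distinct
lemma pv_sorted2_congr (xs ys : List (String × Int)) (hp : xs.Perm ys)
    (hnd : (ys.map Prod.fst).Nodup) :
    PySem.List.sorted2 xs (fun x => -x.2) (fun x => x.1) =
      PySem.List.sorted2 ys (fun x => -x.2) (fun x => x.1) := by
  rw [pv_sorted2_eq_sorted_toLex, pv_sorted2_eq_sorted_toLex]
  set key : String × Int → Lex (Int × String) := fun x => toLex ((-x.2 : Int), x.1) with hkey
  have hperm : (PySem.List.sorted ys key).Perm xs :=
    (PySem.List.sorted_perm ys key false).trans hp.symm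
  have hle : (PySem.List.sorted ys key).Pairwise (fun a b => key a ≤ key b) :=
    PySem.List.sorted_pairwise ys key
  have hne : (PySem.List.sorted ys key).Pairwise (fun a b => a.1 ≠ b.1) := by
    have h1 : ((PySem.List.sorted ys key false).map Prod.fst).Nodup :=
      (((PySem.List.sorted_perm ys key false).map Prod.fst).nodup_iff).mpr hnd
    exact (List.pairwise_map).mp h1
  have hlt : (PySem.List.sorted ys key).Pairwise (fun a b => key a < key b) := by
    refine (hle.and hne).imp ?_
    rintro a b ⟨h1, h2⟩
    refine lt_of_le_of_ne h1 ?_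
    intro hc
    apply h2
    have : ((-a.2 : Int), a.1) = ((-b.2 : Int), b.1) := by
      simpa [hkey] using hc
    exact (Prod.mk.injEq _ _ _ _ ▸ this).2
  exact PySem.List.sorted_eq_of_perm_of_pairwise_lt xs _ key hperm hlt

lemma pv_discard_discard (s : PySem.Set String) (w : String) :
    (s.discard w).discard w = s.discard w := by
  show List.filter _ (List.filter _ _) = _
  rw [List.filter_filter]
  exact List.filter_congr (by intro x _; cases h : x == w <;> simp)

lemma pv_discard_runs (run rest' : List String) (w : String) (hrun : ∀ x ∈ run, x = w) :
    (PySem.Set.ofList (run ++ rest')).discard w = (PySem.Set.ofList rest').discard w := by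
  induction run with
  | nil => rfl
  | cons x run' ih =>
    have hx : x = w := hrun x (by simp)
    rw [hx]
    rw [List.cons_append, PySem.Set.ofList_cons]
    show List.filter _ _ = _
    rw [List.filter_cons]
    simp only [beq_self_eq_true, Bool.not_true]
    rw [if_neg (by simp)]
    show PySem.Set.discard (PySem.Set.discard (PySem.Set.ofList (run' ++ rest')) w) w = _
    rw [pv_discard_discard, ih (fun x hx => hrun x (by simp [hx]))]

lemma pv_discard_of_not_mem (s : PySem.Set String) (w : String) (h : w ∉ s) :
    s.discard w = s := by
  show List.filter _ _ = _
  exact List.filter_eq_self.mpr (by intro x hx; simp; rintro rfl; exact h hx)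

lemma pv_not_mem_dropWhile (w : String) (l : List String) (hl : l.Pairwise (· ≤ ·))
    (hge : ∀ x ∈ l, w ≤ x) : w ∉ l.dropWhile (fun x => x == w) := by
  induction l with
  | nil => simp
  | cons x t ih =>
    by_cases hx : (x == w) = true
    · rw [List.dropWhile_cons, if_pos hx]
      exact ih (List.Pairwise.sublist (List.sublist_cons_self x t) hl)
        (fun y hy => hge y (List.mem_cons_of_mem x hy))
    · rw [List.dropWhile_cons, if_neg hx]
      intro hmem
      have hxw : x ≠ w := by simpa using hx
      rcases List.mem_cons.mp hmem with h1 | h1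
      · exact hxw h1.symm
      · have h2 : x ≤ w := (List.pairwise_cons.mp hl).1 w h1
        have h3 : w ≤ x := hge x (List.mem_cons_self)
        exact hxw (le_antisymm h2 h3)

lemma pv_rle_sorted (l : List String) (h : l.Pairwise (· ≤ ·)) :
    pvRLE l = (PySem.Set.ofList l).map (fun p => (p, (l.count p : Int))) := by
  induction l using pvRLE.induct with
  | case1 => simp [pvRLE]
  | case2 w rest ih =>
    have hpr : rest.Pairwise (· ≤ ·) := (List.pairwise_cons.mp h).2
    have hwle : ∀ x ∈ rest, w ≤ x := (List.pairwise_cons.mp h).1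
    have hsplit : rest.takeWhile (fun x => x == w) ++ rest.dropWhile (fun x => x == w) = rest :=
      List.takeWhile_append_dropWhile
    have hrun : ∀ x ∈ rest.takeWhile (fun x => x == w), x = w := fun x hx => by
      have := List.mem_takeWhile_imp hx; simpa using this
    have hpr' : (rest.dropWhile (fun x => x == w)).Pairwise (· ≤ ·) :=
      List.Pairwise.sublist (List.dropWhile_sublist _) hpr
    have hwnot : w ∉ rest.dropWhile (fun x => x == w) := pv_not_mem_dropWhile w rest hpr hwle
    have hcountw : (w :: rest).count w = 1 + (rest.takeWhile (fun x => x == w)).length := by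
      have h1 : (rest.takeWhile (fun x => x == w)).count w =
          (rest.takeWhile (fun x => x == w)).length :=
        List.count_eq_length.mpr (fun b hb => (hrun b hb).symm)
      have h2 : (rest.dropWhile (fun x => x == w)).count w = 0 := List.count_eq_zero.mpr hwnot
      rw [List.count_cons_self]
      conv_lhs => rw [← hsplit]
      rw [List.count_append, h1, h2]
      omega
    have hofl : PySem.Set.ofList (w :: rest) =
        w :: PySem.Set.ofList (rest.dropWhile (fun x => x == w)) := by
      rw [PySem.Set.ofList_cons]
      conv_lhs => rw [← hsplit]
      rw [pv_discard_runs _ _ w hrun,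
        pv_discard_of_not_mem _ _ (fun hc => hwnot ((PySem.Set.mem_ofList _ _).mp hc))]
    rw [pvRLE, ih hpr', hofl, List.map_cons]
    congr 1
    · rw [show ((w :: rest).count w : Int) = ((1 + (rest.takeWhile (fun x => x == w)).length : Nat) : Int) from by rw [hcountw]]
      push_cast
      ring_nf
    · refine List.map_congr_left ?_
      intro p hp
      have hp' : p ∈ rest.dropWhile (fun x => x == w) := (PySem.Set.mem_ofList _ _).mp hp
      have hpne : p ≠ w := fun hc => hwnot (hc ▸ hp')
      have hc1 : (w :: rest).count p = (rest.dropWhile (fun x => x == w)).count p := by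
        rw [List.count_cons_of_ne (Ne.symm hpne)]
        conv_lhs => rw [← hsplit]
        rw [List.count_append, List.count_eq_zero.mpr (fun hc => hpne (hrun p hc)), Nat.zero_add]
      rw [hc1]

lemma pv_finish (acc : PySem.Dict Int (List (String × Int))) (L : Int)
    (xs ys : List (String × Int)) (hp : xs.Perm ys) (hnd : (ys.map Prod.fst).Nodup) :
    (if xs.isEmpty then acc
      else acc.insert L (PySem.List.sorted2 xs (fun x => -x.2) (fun x => x.1))) =
    (if (PySem.List.sorted2 ys (fun x => -x.2) (fun x => x.1)).isEmpty then acc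
      else acc.insert L (PySem.List.sorted2 ys (fun x => -x.2) (fun x => x.1))) := by
  have hss := pv_sorted2_congr xs ys hp hnd
  have hlen : xs.length = (PySem.List.sorted2 ys (fun x => -x.2) (fun x => x.1)).length := by
    rw [← hss]
    exact ((PySem.List.sorted2_perm xs _ _ _).length_eq).symm
  have hie : xs.isEmpty = (PySem.List.sorted2 ys (fun x => -x.2) (fun x => x.1)).isEmpty := by
    rw [Bool.eq_iff_iff, List.isEmpty_iff_length_eq_zero, List.isEmpty_iff_length_eq_zero, hlen]
  rw [hie, hss]

set_option maxHeartbeats 2000000 in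
lemma pv_step_eq (sequence : String) (min_repeats : Int) (L : Int)
    (acc : PySem.Dict Int (List (String × Int))) :
    (let pattern_counts : PySem.Dict String Int :=
      (PySem.List.pyRange 0 (PySem.Str.len sequence - L + 1) 1).foldl (fun d i =>
        let pattern := PySem.Str.slice sequence (some i) (some (i + L))
        if pattern.toList.all (fun base => PySem.Chars.isIn [base] "ACGT".toList) then
          d.insert pattern (d.getD pattern 0 + 1)
        else d) PySem.Dict.empty
    let repetitive_patterns := pattern_counts.items.filter (fun x => decide (min_repeats ≤ x.2))
    if repetitive_patterns.isEmpty then acc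
    else acc.insert L (PySem.List.sorted2 repetitive_patterns (fun x => -x.2) (fun x => x.1))) =
    (let ws := PySem.List.sorted ((PySem.List.pyRange 0 (PySem.Str.len sequence - L + 1) 1).map
                (fun i => PySem.Str.slice sequence (some i) (some (i + L)))) (fun w => w)
     let entries := (pvRLE ws).filter (fun x =>
       decide (min_repeats ≤ x.2) && PySem.Set.issubset (PySem.Set.ofList x.1.toList) (PySem.Set.ofList "ACGT".toList))
     let entries2 := PySem.List.sorted2 entries (fun x => -x.2) (fun x => x.1)
     if entries2.isEmpty then acc else acc.insert L entries2) := by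
  set wsRaw : List String := (PySem.List.pyRange 0 (PySem.Str.len sequence - L + 1) 1).map
      (fun i => PySem.Str.slice sequence (some i) (some (i + L))) with hwsRaw
  set P : String → Bool := fun p => p.toList.all (fun base => PySem.Chars.isIn [base] "ACGT".toList) with hP
  have hfold : PySem.Dict.counter (wsRaw.filter P) =
      (PySem.List.pyRange 0 (PySem.Str.len sequence - L + 1) 1).foldl (fun d i =>
        if P (PySem.Str.slice sequence (some i) (some (i + L))) then
          d.insert (PySem.Str.slice sequence (some i) (some (i + L)))
            ((d.getD (PySem.Str.slice sequence (some i) (some (i + L))) 0) + 1)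
        else d) PySem.Dict.empty := by
    rw [← PySem.Dict.foldl_insert_getD_add_one_eq_counter, ← PySem.List.foldl_if_eq_foldl_filter,
      hwsRaw, List.foldl_map]
  show (if (((((PySem.List.pyRange 0 (PySem.Str.len sequence - L + 1) 1).foldl (fun d i =>
        if P (PySem.Str.slice sequence (some i) (some (i + L))) then
          d.insert (PySem.Str.slice sequence (some i) (some (i + L)))
            ((d.getD (PySem.Str.slice sequence (some i) (some (i + L))) 0) + 1)
        else d) PySem.Dict.empty).items).filter (fun x => decide (min_repeats ≤ x.2))).isEmpty) then acc
      else acc.insert L (PySem.List.sorted2 ((((PySem.List.pyRange 0 (PySem.Str.len sequence - L + 1) 1).foldl (fun d i =>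
        if P (PySem.Str.slice sequence (some i) (some (i + L))) then
          d.insert (PySem.Str.slice sequence (some i) (some (i + L)))
            ((d.getD (PySem.Str.slice sequence (some i) (some (i + L))) 0) + 1)
        else d) PySem.Dict.empty).items).filter (fun x => decide (min_repeats ≤ x.2))) (fun x => -x.2) (fun x => x.1))) =
    (if (PySem.List.sorted2 ((pvRLE (PySem.List.sorted wsRaw (fun w => w))).filter (fun x =>
       decide (min_repeats ≤ x.2) && PySem.Set.issubset (PySem.Set.ofList x.1.toList) (PySem.Set.ofList "ACGT".toList)))
         (fun x => -x.2) (fun x => x.1)).isEmpty then acc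
     else acc.insert L (PySem.List.sorted2 ((pvRLE (PySem.List.sorted wsRaw (fun w => w))).filter (fun x =>
       decide (min_repeats ≤ x.2) && PySem.Set.issubset (PySem.Set.ofList x.1.toList) (PySem.Set.ofList "ACGT".toList)))
         (fun x => -x.2) (fun x => x.1)))
  rw [← hfold, PySem.Dict.items_counter]
  have hpair : (PySem.List.sorted wsRaw (fun w => w)).Pairwise (· ≤ ·) := by
    simpa using PySem.List.sorted_pairwise wsRaw (fun w => w)
  rw [pv_rle_sorted _ hpair]
  apply pv_finish
  · -- the permutation of the two kept lists
    have hcnt : ∀ p, (PySem.List.sorted wsRaw (fun w => w)).count p = wsRaw.count p :=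
      fun p => (PySem.List.sorted_perm wsRaw (fun w => w) false).count_eq p
    have hmemP : ∀ k ∈ PySem.Set.ofList (List.filter P wsRaw),
        List.count k (List.filter P wsRaw) = List.count k wsRaw := fun k hk =>
      List.count_filter ((List.mem_filter.mp ((PySem.Set.mem_ofList _ _).mp hk)).2)
    have hXS : ((PySem.Set.ofList (List.filter P wsRaw)).map
          (fun k => (k, (List.count k (List.filter P wsRaw) : Int)))).filter
          (fun x => decide (min_repeats ≤ x.2)) =
        ((PySem.Set.ofList (List.filter P wsRaw)).filter
          (fun k => decide (min_repeats ≤ (List.count k wsRaw : Int)))).map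
          (fun k => (k, (List.count k wsRaw : Int))) := by
      rw [List.filter_map]
      have h1 : List.filter ((fun x : String × Int => decide (min_repeats ≤ x.2)) ∘
            (fun k => (k, (List.count k (List.filter P wsRaw) : Int))))
            (PySem.Set.ofList (List.filter P wsRaw)) =
          List.filter (fun k => decide (min_repeats ≤ (List.count k wsRaw : Int)))
            (PySem.Set.ofList (List.filter P wsRaw)) :=
        List.filter_congr (fun k hk => by simp only [Function.comp_apply]; rw [hmemP k hk])
      rw [h1]
      exact List.map_congr_left (fun k hk => by rw [hmemP k (List.mem_of_mem_filter hk)])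
    have hYS : ((PySem.Set.ofList (PySem.List.sorted wsRaw (fun w => w))).map
          (fun p => (p, (List.count p (PySem.List.sorted wsRaw (fun w => w)) : Int)))).filter
          (fun x => decide (min_repeats ≤ x.2) &&
            PySem.Set.issubset (PySem.Set.ofList x.1.toList) (PySem.Set.ofList "ACGT".toList)) =
        ((PySem.Set.ofList (PySem.List.sorted wsRaw (fun w => w))).filter
          (fun k => decide (min_repeats ≤ (List.count k wsRaw : Int)) && P k)).map
          (fun k => (k, (List.count k wsRaw : Int))) := by
      rw [List.filter_map]
      have h1 : List.filter ((fun x : String × Int => decide (min_repeats ≤ x.2) &&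
            PySem.Set.issubset (PySem.Set.ofList x.1.toList) (PySem.Set.ofList "ACGT".toList)) ∘
            (fun p => (p, (List.count p (PySem.List.sorted wsRaw (fun w => w)) : Int))))
            (PySem.Set.ofList (PySem.List.sorted wsRaw (fun w => w))) =
          List.filter (fun k => decide (min_repeats ≤ (List.count k wsRaw : Int)) && P k)
            (PySem.Set.ofList (PySem.List.sorted wsRaw (fun w => w))) :=
        List.filter_congr (fun k _ => by
          simp only [Function.comp_apply, hP]
          rw [hcnt k, ← pv_valid_eq])
      rw [h1]
      exact List.map_congr_left (fun k _ => by rw [hcnt k])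
    rw [hXS, hYS]
    refine List.Perm.map _ ?_
    refine (List.perm_ext_iff_of_nodup (List.Nodup.filter _ (PySem.Set.nodup_ofList _))
      (List.Nodup.filter _ (PySem.Set.nodup_ofList _))).mpr ?_
    intro k
    have hmemws : k ∈ PySem.List.sorted wsRaw (fun w => w) ↔ k ∈ wsRaw :=
      (PySem.List.sorted_perm wsRaw (fun w => w) false).mem_iff
    simp only [List.mem_filter, PySem.Set.mem_ofList, hmemws, Bool.and_eq_true]
    tauto
  · -- distinct patterns in the B-side kept list
    rw [List.filter_map, List.map_map]
    have : (Prod.fst ∘ fun p => (p, (List.count p (PySem.List.sorted wsRaw (fun w => w)) : Int))) = id := rfl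
    rw [this, List.map_id]
    exact List.Nodup.filter _ (PySem.Set.nodup_ofList _)

-- ===== VERDICT (by name: the statement is the Claim_ definition above) =====
set_option maxHeartbeats 2000000 in
theorem find_repetitions_spec : Claim_equal_find_repetitions := by
  intro sequence min_length max_length min_repeats _
  unfold Spec_find_repetitions find_repetitions find_repetitions_alt
  refine congrArg PySem.Dict.items ?_
  have hstep : ∀ (acc : PySem.Dict Int (List (String × Int))) (L : Int),
      (fun (results : PySem.Dict Int (List (String × Int))) (pattern_length : Int) =>
        let pattern_counts : PySem.Dict String Int :=
          (PySem.List.pyRange 0 (PySem.Str.len sequence - pattern_length + 1) 1).foldl (fun d i =>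
            let pattern := PySem.Str.slice sequence (some i) (some (i + pattern_length))
            if pattern.toList.all (fun base => PySem.Chars.isIn [base] "ACGT".toList) then
              d.insert pattern (d.getD pattern 0 + 1)
            else d) PySem.Dict.empty
        let repetitive_patterns := pattern_counts.items.filter (fun x => decide (min_repeats ≤ x.2))
        if repetitive_patterns.isEmpty then results
        else results.insert pattern_length
          (PySem.List.sorted2 repetitive_patterns (fun x => -x.2) (fun x => x.1))) acc L =
      (fun (results : PySem.Dict Int (List (String × Int))) (length_ : Int) =>
        let ws := PySem.List.sorted ((PySem.List.pyRange 0 (PySem.Str.len sequence - length_ + 1) 1).map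
                    (fun i => PySem.Str.slice sequence (some i) (some (i + length_)))) (fun w => w)
        let entries := (pvRLE ws).filter (fun x =>
          decide (min_repeats ≤ x.2) && PySem.Set.issubset (PySem.Set.ofList x.1.toList) (PySem.Set.ofList "ACGT".toList))
        let entries2 := PySem.List.sorted2 entries (fun x => -x.2) (fun x => x.1)
        if entries2.isEmpty then results else results.insert length_ entries2) acc L :=
    fun acc L => pv_step_eq sequence min_repeats L acc
  exact PySem.List.foldl_congr_mem _ _ _ _ (fun acc L _ => hstep acc L)
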